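-- pv_equiv track=rewrite | github.com/llestandi/pydecomp | pydecomp/core/Canonical.py | build_eval_rank_list
-- ===== SOURCE A (Python) =====
-- def build_eval_rank_list(maxrank):
--     """
--     @author : Lucas 27/06/18
--     Sort of handwritten log spacing of rank evaluation.
--     """
--     if maxrank < 20:
--         rank_list=[i for i in range(1,maxrank)]
--     else:
--         rank_list=[i for i in range(1,20)]
--         try:
--             for i in range(20,min(100, maxrank),5):
--                 rank_list.append(i)
--         except:
--             pass
--         try:
--             for i in range(100, maxrank,20):
--                 rank_list.append(i)
--         except:
--             pass
--     return rank_list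
-- ===== SOURCE B (Python) =====
-- def build_eval_rank_list(maxrank):
--     """One adaptive-stride walk: start at 1 and keep appending, widening the
--     step as the rank grows (1 below 20, 5 below 100, 20 beyond)."""
--     rank_list = []
--     i = 1
--     while i < maxrank:
--         rank_list.append(i)
--         i += 1 if i < 20 else (5 if i < 100 else 20)
--     return rank_list
-- ===== Notes on version B (the rewrite author's own statement) =====
-- stated objective: simpler
-- what changed: Replaces A's small-maxrank special case plus three fixed-segment range loops (with their try/except wrappers) by a single while loop that walks from 1 with an adaptive stride (1 below 20, 5 below 100, 20 beyond).
import Mathlib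
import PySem

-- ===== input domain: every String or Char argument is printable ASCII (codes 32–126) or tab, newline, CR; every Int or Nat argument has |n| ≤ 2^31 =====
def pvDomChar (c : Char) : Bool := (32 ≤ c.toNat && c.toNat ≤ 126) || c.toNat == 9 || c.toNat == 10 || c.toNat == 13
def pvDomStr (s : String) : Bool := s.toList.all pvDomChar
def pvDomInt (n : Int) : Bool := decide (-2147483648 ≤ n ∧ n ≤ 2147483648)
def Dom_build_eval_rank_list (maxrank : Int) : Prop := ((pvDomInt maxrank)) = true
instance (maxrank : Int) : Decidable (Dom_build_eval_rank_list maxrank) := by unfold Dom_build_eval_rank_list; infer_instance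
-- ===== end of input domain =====

-- B replaces A's special case and three fixed range segments by one while loop
-- walking from 1 with an adaptive stride (objective: simpler).

-- ===== PORT A =====
-- A: if maxrank < 20 a single comprehension over range(1,maxrank); else range(1,20)
-- followed by two append loops over range(20,min(100,maxrank),5) and range(100,maxrank,20).
def build_eval_rank_list (maxrank : Int) : List Int :=
  if maxrank < 20 then
    PySem.List.pyRange 1 maxrank 1
  else
    let rank_list := PySem.List.pyRange 1 20 1
    let rank_list := (PySem.List.pyRange 20 (min 100 maxrank) 5).foldl (fun acc i => acc ++ [i]) rank_list
    let rank_list := (PySem.List.pyRange 100 maxrank 20).foldl (fun acc i => acc ++ [i]) rank_list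
    rank_list

-- ===== PORT B =====
-- B: while i < maxrank: append i; i += 1 if i < 20 else (5 if i < 100 else 20).
def bWalk (maxrank i : Int) (acc : List Int) : List Int :=
  if _h : i < maxrank then
    bWalk maxrank (i + (if i < 20 then 1 else if i < 100 then 5 else 20)) (acc ++ [i])
  else acc
termination_by (maxrank - i).toNat
decreasing_by split_ifs <;> omega

def build_eval_rank_list_alt (maxrank : Int) : List Int :=
  bWalk maxrank 1 []

-- ===== PRECONDITION & SPEC =====
def Spec_build_eval_rank_list (maxrank : Int) (out : List Int) : Prop := out = build_eval_rank_list_alt maxrank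
instance (maxrank : Int) (out : List Int) : Decidable (Spec_build_eval_rank_list maxrank out) := by unfold Spec_build_eval_rank_list; infer_instance

-- ===== CLAIM =====
def Claim_equal_build_eval_rank_list : Prop := ∀ (maxrank : Int), Dom_build_eval_rank_list maxrank → Spec_build_eval_rank_list maxrank (build_eval_rank_list maxrank)

-- ===== LEMMAS AND PROOFS =====

theorem pyRange_pos_nil (a b s : Int) (hs : 0 < s) (hab : b ≤ a) :
    PySem.List.pyRange a b s = [] := by
  rw [PySem.List.pyRange_of_pos _ _ hs, if_neg (by omega)]
  simp

theorem pyRange_pos_cons (a b s : Int) (hs : 0 < s) (hab : a < b) :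
    PySem.List.pyRange a b s = a :: PySem.List.pyRange (a + s) b s := by
  rw [PySem.List.pyRange_of_pos _ _ hs, PySem.List.pyRange_of_pos _ _ hs, if_pos hab]
  have key : (b - a + s - 1) / s = (b - a - 1) / s + 1 := by
    have h1 : b - a + s - 1 = (b - a - 1) + 1 * s := by ring
    rw [h1, Int.add_mul_ediv_right _ _ (by omega : s ≠ 0)]
  have hq : 0 ≤ (b - a - 1) / s := Int.ediv_nonneg (by omega) (by omega)
  rw [key]
  by_cases h2 : a + s < b
  · rw [if_pos h2]
    have h3 : b - (a + s) + s - 1 = b - a - 1 := by ring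
    rw [h3]
    have h4 : ((b - a - 1) / s + 1).toNat = ((b - a - 1) / s).toNat + 1 := by omega
    rw [h4, List.range_succ_eq_map]
    simp only [List.map_cons, List.map_map]
    refine congrArg₂ _ (by simp) ?_
    apply List.map_congr_left
    intro k _
    simp [Function.comp]
    ring
  · rw [if_neg h2]
    have h5 : (b - a - 1) / s = 0 :=
      Int.ediv_eq_zero_of_lt (by omega) (by omega)
    rw [h5]
    simp
-- tail region: from i ≥ 100 the walk is range(i, m, 20)
theorem bWalk_tail (m : Int) : ∀ (n : Nat) (i : Int) (acc : List Int),
    (m - i).toNat ≤ n → 100 ≤ i →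
    bWalk m i acc = acc ++ PySem.List.pyRange i m 20 := by
  intro n
  induction n with
  | zero =>
    intro i acc hn hi
    rw [bWalk, dif_neg (by omega), pyRange_pos_nil i m 20 (by omega) (by omega)]
    simp
  | succ n ih =>
    intro i acc hn hi
    by_cases h : i < m
    · rw [bWalk, dif_pos h, if_neg (by omega), if_neg (by omega),
        ih (i + 20) (acc ++ [i]) (by omega) (by omega),
        pyRange_pos_cons i m 20 (by omega) h]
      simp
    · rw [bWalk, dif_neg h, pyRange_pos_nil i m 20 (by omega) (by omega)]
      simp

-- mid region: from 20 ≤ i < 100 (i ≡ 100 mod 5) the walk is range(i,min 100 m,5) ++ range(100,m,20)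
theorem bWalk_mid (m : Int) : ∀ (n : Nat) (i : Int) (acc : List Int),
    (m - i).toNat ≤ n → 20 ≤ i → i < 100 → (100 - i) % 5 = 0 →
    bWalk m i acc = acc ++ PySem.List.pyRange i (min 100 m) 5 ++ PySem.List.pyRange 100 m 20 := by
  intro n
  induction n with
  | zero =>
    intro i acc hn h20 h100 hmod
    rw [bWalk, dif_neg (by omega),
      pyRange_pos_nil i (min 100 m) 5 (by omega) (by omega),
      pyRange_pos_nil 100 m 20 (by omega) (by omega)]
    simp
  | succ n ih =>
    intro i acc hn h20 h100 hmod
    by_cases h : i < m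
    · rw [bWalk, dif_pos h, if_neg (by omega), if_pos h100,
        pyRange_pos_cons i (min 100 m) 5 (by omega) (by omega)]
      by_cases h5 : i + 5 < 100
      · rw [ih (i + 5) (acc ++ [i]) (by omega) (by omega) h5 (by omega)]
        simp
      · have hi100 : i + 5 = 100 := by omega
        rw [hi100, bWalk_tail m n 100 (acc ++ [i]) (by omega) (by omega),
          pyRange_pos_nil 100 (min 100 m) 5 (by omega) (by omega)]
    · rw [bWalk, dif_neg h,
        pyRange_pos_nil i (min 100 m) 5 (by omega) (by omega),
        pyRange_pos_nil 100 m 20 (by omega) (by omega)]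
      simp

-- head region: from 1 ≤ i ≤ 20 the walk is the full three-segment concatenation
theorem bWalk_head (m : Int) : ∀ (n : Nat) (i : Int) (acc : List Int),
    (m - i).toNat ≤ n → 1 ≤ i → i ≤ 20 →
    bWalk m i acc = acc ++ PySem.List.pyRange i (min 20 m) 1
      ++ PySem.List.pyRange 20 (min 100 m) 5 ++ PySem.List.pyRange 100 m 20 := by
  intro n
  induction n with
  | zero =>
    intro i acc hn h1 h20
    rw [bWalk, dif_neg (by omega),
      pyRange_pos_nil i (min 20 m) 1 (by omega) (by omega),
      pyRange_pos_nil 20 (min 100 m) 5 (by omega) (by omega),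
      pyRange_pos_nil 100 m 20 (by omega) (by omega)]
    simp
  | succ n ih =>
    intro i acc hn h1 h20
    by_cases h : i < m
    · by_cases hlt : i < 20
      · rw [bWalk, dif_pos h, if_pos hlt,
          pyRange_pos_cons i (min 20 m) 1 (by omega) (by omega),
          ih (i + 1) (acc ++ [i]) (by omega) (by omega) (by omega)]
        simp
      · have hi20 : i = 20 := by omega
        rw [hi20, bWalk_mid m (n + 1) 20 acc (by omega) (by omega) (by omega) (by omega),
          pyRange_pos_nil 20 (min 20 m) 1 (by omega) (by omega)]
        simp
    · rw [bWalk, dif_neg h,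
        pyRange_pos_nil i (min 20 m) 1 (by omega) (by omega),
        pyRange_pos_nil 20 (min 100 m) 5 (by omega) (by omega),
        pyRange_pos_nil 100 m 20 (by omega) (by omega)]
      simp

theorem alt_eq_segments (maxrank : Int) :
    build_eval_rank_list_alt maxrank
      = PySem.List.pyRange 1 (min 20 maxrank) 1
          ++ PySem.List.pyRange 20 (min 100 maxrank) 5
          ++ PySem.List.pyRange 100 maxrank 20 := by
  unfold build_eval_rank_list_alt
  rw [bWalk_head maxrank (maxrank - 1).toNat 1 [] (by omega) (by omega) (by omega)]
  simp

-- fold-append is plain list append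
theorem foldl_append_singleton (l : List Int) (init : List Int) :
    l.foldl (fun acc i => acc ++ [i]) init = init ++ l := by
  induction l generalizing init with
  | nil => simp
  | cons x xs ih => simp [List.foldl_cons, ih]

-- ===== VERDICT =====
theorem build_eval_rank_list_spec : Claim_equal_build_eval_rank_list := by
  intro maxrank _
  unfold Spec_build_eval_rank_list build_eval_rank_list
  rw [alt_eq_segments]
  by_cases h : maxrank < 20
  · rw [if_pos h, min_eq_right (by omega : maxrank ≤ 20),
      pyRange_pos_nil 20 (min 100 maxrank) 5 (by omega) (by omega),
      pyRange_pos_nil 100 maxrank 20 (by omega) (by omega)]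
    simp
  · rw [if_neg h]
    simp only [foldl_append_singleton]
    rw [min_eq_left (by omega : (20 : Int) ≤ maxrank)]
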